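-- pv_equiv track=rewrite | github.com/xannonxx/Aiml_lab | 8.py | getResponse
-- ===== SOURCE A (Python) =====
-- import operator #as parameter in sort and sorted
--
-- def getResponse(neighbours):
-- 	classVotes = {}
-- 	for x in range(len(neighbours)):
-- 		response = neighbours[x][-1]
-- 		if response in classVotes:
-- 			classVotes[response] += 1
-- 		else:
-- 			classVotes[response] = 1
--
-- 	sortedClassVotes = sorted(classVotes.items(), key=operator.itemgetter(1), reverse=True) #sort the items based on descending order
-- 	return sortedClassVotes[0][0]
-- ===== SOURCE B (Python) =====
-- def getResponse(neighbours):
--     labels = [row[-1] for row in neighbours]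
--     best = labels[0]
--     for lab in labels:
--         if labels.count(lab) > labels.count(best):
--             best = lab
--     return best
-- ===== Notes on version B (the rewrite author's own statement) =====
-- stated objective: alternative
-- what changed: B drops the vote dictionary entirely: it extracts the label column once, then runs a running-best scan over the labels where each comparison recounts occurrences with list.count, replacing A's dict counter plus descending sort plus index; the strict-greater update keeps A's first-encountered tie-break.
import Mathlib
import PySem

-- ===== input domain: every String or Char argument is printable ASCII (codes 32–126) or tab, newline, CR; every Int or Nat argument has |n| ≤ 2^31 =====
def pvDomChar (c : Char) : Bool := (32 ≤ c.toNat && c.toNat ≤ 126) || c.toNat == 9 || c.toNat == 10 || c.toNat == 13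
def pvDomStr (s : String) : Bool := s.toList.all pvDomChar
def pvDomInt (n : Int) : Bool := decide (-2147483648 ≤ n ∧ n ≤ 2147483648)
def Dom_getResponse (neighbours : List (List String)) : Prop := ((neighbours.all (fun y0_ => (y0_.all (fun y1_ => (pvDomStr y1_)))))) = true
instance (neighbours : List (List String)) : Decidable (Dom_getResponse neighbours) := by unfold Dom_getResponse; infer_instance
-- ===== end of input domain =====

-- B drops the vote dictionary: it extracts the label column and keeps a running best
-- label, recounting with list.count, instead of A's dict counter + descending sort;
-- objective: alternative (not faster).

-- ===== PORT A =====
def getResponse (neighbours : List (List String)) : String :=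
  let classVotes : PySem.Dict String Int :=
    (PySem.List.pyRange 0 (PySem.List.len neighbours)).foldl
      (fun d x =>
        -- response = neighbours[x][-1]; x is always in range, [-1] raises on an empty row (outside Pre_)
        let response := (PySem.List.pyGet? (PySem.List.pyGetD neighbours x []) (-1)).getD ""
        if d.contains response then d.modify response 0 (· + 1)
        else d.insert response 1)
      PySem.Dict.empty
  let sortedClassVotes := PySem.List.sorted classVotes.items (fun p => p.2) true
  -- sortedClassVotes[0][0]; [0] raises on empty input (outside Pre_)
  ((PySem.List.pyGet? sortedClassVotes 0).getD ("", 0)).1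

-- ===== PORT B =====
def getResponse_alt (neighbours : List (List String)) : String :=
  -- labels = [row[-1] for row in neighbours]; row[-1] raises on an empty row (outside Pre_)
  let labels := neighbours.map (fun row => (PySem.List.pyGet? row (-1)).getD "")
  -- best = labels[0]; raises on empty input (outside Pre_)
  let best0 := (PySem.List.pyGet? labels 0).getD ""
  labels.foldl
    (fun best lab =>
      if PySem.List.count labels best < PySem.List.count labels lab then lab else best)
    best0

-- ===== PRECONDITION & SPEC =====
-- A raises IndexError on an empty neighbours list (sortedClassVotes[0]) and on any empty row
-- (neighbours[x][-1]); B raises there too (labels[0] / row[-1]): those inputs are excluded.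
def Pre_getResponse (neighbours : List (List String)) : Prop :=
  neighbours ≠ [] ∧ ∀ row ∈ neighbours, row ≠ []
instance (neighbours : List (List String)) : Decidable (Pre_getResponse neighbours) := by
  unfold Pre_getResponse; infer_instance

def pvWitness_getResponse : List (List String) := [["1.0", "a"], ["2.0", "b"], ["3.0", "a"]]

def Spec_getResponse (neighbours : List (List String)) (out : String) : Prop := out = getResponse_alt neighbours
instance (neighbours : List (List String)) (out : String) : Decidable (Spec_getResponse neighbours out) := by unfold Spec_getResponse; infer_instance

-- ===== CLAIM (what is proved, stated in full; the proofs are below) =====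
def Claim_equal_getResponse : Prop := ∀ (neighbours : List (List String)), Dom_getResponse neighbours → Pre_getResponse neighbours → Spec_getResponse neighbours (getResponse neighbours)

-- ===== LEMMAS AND PROOFS =====

-- the per-row label both programs extract
def pvLab (row : List String) : String := (PySem.List.pyGet? row (-1)).getD ""

-- A's branching step is exactly the counter step
theorem pvStepA (d : PySem.Dict String Int) (r : String) :
    (if d.contains r then d.modify r 0 (· + 1) else d.insert r 1) =
      d.insert r (d.getD r 0 + 1) := by
  by_cases h : d.contains r = true
  · simp [h, PySem.Dict.modify]
  · rw [PySem.Dict.getD_of_not_contains d 0 (by simpa using h)]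
    simp [h]

-- head of a reverse-sorted list is the first element of maximal key
theorem pvHead?_insertBy {α κ : Type} [LinearOrder κ] (key : α → κ) (x : α) (ys : List α) :
    (PySem.List.insertBy (fun a b => decide (key b < key a)) x ys).head? =
      some (match ys.head? with
            | none => x
            | some y => if key y < key x then x else y) := by
  cases ys with
  | nil => rfl
  | cons y t =>
    simp only [PySem.List.insertBy]
    split_ifs with h
    · simp_all
    · simp_all

theorem pvHead?_foldl_insertBy {α κ : Type} [LinearOrder κ] (key : α → κ) :
    ∀ (l : List α) (acc : List α),
      (l.foldl (fun acc x => PySem.List.insertBy (fun a b => decide (key b < key a)) x acc) acc).head? =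
        l.foldl (fun m x =>
          match m with
          | none => some x
          | some m => if key m < key x then some x else some m) acc.head? := by
  intro l
  induction l with
  | nil => intro acc; rfl
  | cons x t ih =>
    intro acc
    rw [List.foldl_cons, List.foldl_cons, ih, pvHead?_insertBy key x acc]
    cases acc with
    | nil => rfl
    | cons y ys =>
      simp only [List.head?_cons]
      split_ifs <;> rfl

theorem pvHead?_sorted_rev {α κ : Type} [LinearOrder κ] (l : List α) (key : α → κ) :
    (PySem.List.sorted l key true).head? = PySem.List.max? l key := by
  rw [PySem.List.sorted_rev_eq_foldl_insertBy, PySem.List.max?]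
  exact pvHead?_foldl_insertBy key l []

-- max? over a mapped list
theorem pvMax?_map {α β κ : Type} [LinearOrder κ] (g : α → β) (key : β → κ) (l : List α) :
    PySem.List.max? (l.map g) key = (PySem.List.max? l (fun x => key (g x))).map g := by
  rw [PySem.List.max?, PySem.List.max?]
  have aux : ∀ (l : List α) (acc : Option α),
      (l.map g).foldl (fun acc x =>
          match acc with
          | none => some x
          | some m => if key m < key x then some x else some m) (acc.map g) =
        (l.foldl (fun acc x =>
          match acc with
          | none => some x
          | some m => if key (g m) < key (g x) then some x else some m) acc).map g := by
    intro l
    induction l with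
    | nil => intro acc; rfl
    | cons x t ih =>
      intro acc
      cases acc with
      | none => simpa using ih (some x)
      | some m =>
        simp only [List.map_cons, List.foldl_cons, Option.map_some]
        split_ifs with h
        · exact ih (some x)
        · exact ih (some m)
  exact aux l none

-- A's vote dict is the counter of the row labels
theorem pvFoldCounter (ls : List String) :
    ls.foldl (fun d r => if d.contains r then d.modify r 0 (· + 1) else d.insert r 1)
      PySem.Dict.empty = PySem.Dict.counter ls := by
  rw [show (fun (d : PySem.Dict String Int) (r : String) =>
        if d.contains r then d.modify r 0 (· + 1) else d.insert r 1) =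
      fun d r => d.insert r (d.getD r 0 + 1) from funext fun d => funext fun r => pvStepA d r]
  exact PySem.Dict.foldl_insert_getD_add_one_eq_counter ls

theorem pvDictA (neighbours : List (List String)) :
    (PySem.List.pyRange 0 (PySem.List.len neighbours)).foldl
      (fun d x =>
        let response := (PySem.List.pyGet? (PySem.List.pyGetD neighbours x []) (-1)).getD ""
        if d.contains response then d.modify response 0 (· + 1)
        else d.insert response 1)
      PySem.Dict.empty = PySem.Dict.counter (neighbours.map pvLab) := by
  have h := PySem.List.foldl_pyRange_pyGetD neighbours []
      (fun (d : PySem.Dict String Int) row =>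
        if d.contains (pvLab row) then d.modify (pvLab row) 0 (· + 1)
        else d.insert (pvLab row) 1)
      PySem.Dict.empty (a := 0) (le_refl 0)
  exact h.trans ((List.foldl_map (f := pvLab)
      (g := fun (d : PySem.Dict String Int) r =>
        if d.contains r then d.modify r 0 (· + 1) else d.insert r 1)).symm.trans
    (pvFoldCounter (neighbours.map pvLab)))

-- ==== B-side machinery: the running-best scan is max?, and max? ignores duplicates ====

-- the fresh elements Set.ofList appends past an already-seen prefix s
def pvNew {α : Type} [DecidableEq α] (s : List α) : List α → List α
  | [] => []
  | x :: t => if x ∈ s then pvNew s t else x :: pvNew (s ++ [x]) t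

theorem pvOfListAcc {α : Type} [DecidableEq α] [BEq α] [LawfulBEq α] :
    ∀ (l s : List α), l.foldl PySem.Set.add s = s ++ pvNew s l := by
  intro l
  induction l with
  | nil => intro s; simp [pvNew]
  | cons x t ih =>
    intro s
    by_cases hx : x ∈ s
    · simp [pvNew, hx, PySem.Set.add, PySem.Set.contains, ih]
    · simp [pvNew, hx, PySem.Set.add, PySem.Set.contains, ih (s ++ [x])]

-- folding the max?-step over a list equals folding it over the not-yet-seen elements,
-- provided the accumulator already dominates everything seen
theorem pvFoldDedup {α κ : Type} [DecidableEq α] [LinearOrder κ] (key : α → κ) :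
    ∀ (l s : List α) (m : α), (∀ x ∈ s, key x ≤ key m) →
      l.foldl (fun acc x =>
          match acc with
          | none => some x
          | some m => if key m < key x then some x else some m) (some m) =
        (pvNew s l).foldl (fun acc x =>
          match acc with
          | none => some x
          | some m => if key m < key x then some x else some m) (some m) := by
  intro l
  induction l with
  | nil => intro s m _; rfl
  | cons x t ih =>
    intro s m hs
    by_cases hx : x ∈ s
    · have hle : ¬ key m < key x := not_lt.mpr (hs x hx)
      simp only [pvNew, if_pos hx, List.foldl_cons, hle]
      exact ih s m hs
    · simp only [pvNew, if_neg hx, List.foldl_cons]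
      by_cases hk : key m < key x
      · simp only [if_pos hk]
        refine ih (s ++ [x]) x ?_
        intro y hy
        rcases List.mem_append.mp hy with h | h
        · exact le_of_lt (lt_of_le_of_lt (hs y h) hk)
        · simp only [List.mem_singleton] at h; subst h; exact le_refl _
      · simp only [if_neg hk]
        refine ih (s ++ [x]) m ?_
        intro y hy
        rcases List.mem_append.mp hy with h | h
        · exact hs y h
        · simp only [List.mem_singleton] at h; subst h; exact not_lt.mp hk

-- the Option-valued fold from 'some m' is the plain running-best fold from m
theorem pvFoldSome {α κ : Type} [LinearOrder κ] (key : α → κ) :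
    ∀ (l : List α) (m : α),
      l.foldl (fun acc x =>
          match acc with
          | none => some x
          | some m => if key m < key x then some x else some m) (some m) =
        some (l.foldl (fun b x => if key b < key x then x else b) m) := by
  intro l
  induction l with
  | nil => intro m; rfl
  | cons x t ih =>
    intro m
    simp only [List.foldl_cons]
    by_cases hk : key m < key x
    · simp only [if_pos hk]; exact ih x
    · simp only [if_neg hk]; exact ih m

-- B's running-best scan over the full label list computes max? over the distinct labels
theorem pvScanEqMax {α κ : Type} [DecidableEq α] [BEq α] [LawfulBEq α] [LinearOrder κ]
    (key : α → κ) (h : α) (t : List α) :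
    PySem.List.max? (PySem.Set.ofList (h :: t)) key =
      some ((h :: t).foldl (fun b x => if key b < key x then x else b) h) := by
  have hof : PySem.Set.ofList (h :: t) = h :: pvNew [h] t := by
    rw [PySem.Set.ofList_eq_foldl, List.foldl_cons]
    have : PySem.Set.add ([] : List α) h = [h] := by
      simp [PySem.Set.add, PySem.Set.contains]
    rw [this, pvOfListAcc t [h]]
    rfl
  rw [hof, PySem.List.max?]
  have hstep : List.foldl (fun (acc : Option α) x =>
        match acc with
        | none => some x
        | some m => if key m < key x then some x else some m) none (h :: pvNew [h] t) =
      List.foldl (fun (acc : Option α) x =>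
        match acc with
        | none => some x
        | some m => if key m < key x then some x else some m) (some h) (pvNew [h] t) := rfl
  have hrest : List.foldl (fun (acc : Option α) x =>
        match acc with
        | none => some x
        | some m => if key m < key x then some x else some m) (some h) (pvNew [h] t) =
      some ((h :: t).foldl (fun b x => if key b < key x then x else b) h) := by
    rw [← pvFoldDedup key t [h] h (by intro x hx; simp_all),
        pvFoldSome key t h, List.foldl_cons]
    have hno : (if key h < key h then h else h) = h := by simp
    rw [hno]
  exact hstep.trans hrest

-- ===== VERDICT (by name: the statement is the Claim_ definition above) =====
theorem getResponse_spec : Claim_equal_getResponse := by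
  intro neighbours _ hpre
  obtain ⟨hne, -⟩ := hpre
  unfold Spec_getResponse getResponse getResponse_alt
  rw [pvDictA]
  show _ = (fun labels => (fun best0 => labels.foldl
      (fun best lab =>
        if PySem.List.count labels best < PySem.List.count labels lab then lab else best) best0)
      ((PySem.List.pyGet? labels 0).getD "")) (neighbours.map pvLab)
  cases hl : neighbours.map pvLab with
  | nil => exact absurd (List.map_eq_nil_iff.mp hl) hne
  | cons h t =>
    -- A's side: head of the reverse-sorted items is max? over the distinct labels
    simp only [PySem.Dict.items_counter]
    have hhead := pvHead?_sorted_rev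
        ((PySem.Set.ofList (h :: t)).map (fun k => (k, ((h :: t).count k : Int))))
        (fun p : String × Int => p.2)
    rw [pvMax?_map] at hhead
    have hmax := pvScanEqMax (fun k : String => ((h :: t).count k : Int)) h t
    rw [hmax] at hhead
    simp only [Option.map_some] at hhead
    -- B's side: the counts agree
    have hcnt : ∀ (b x : String),
        (if PySem.List.count (h :: t) b < PySem.List.count (h :: t) x then x else b) =
          (if ((h :: t).count b : Int) < ((h :: t).count x : Int) then x else b) := by
      intro b x; simp [PySem.List.count_eq]
    cases hsort : PySem.List.sorted
        ((PySem.Set.ofList (h :: t)).map (fun k => (k, ((h :: t).count k : Int))))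
        (fun p : String × Int => p.2) true with
    | nil =>
      rw [PySem.List.sorted_eq_nil_iff] at hsort
      have := List.map_eq_nil_iff.mp hsort
      have hh : h ∈ PySem.Set.ofList (h :: t) := (PySem.Set.mem_ofList _ _).mpr (by simp)
      rw [this] at hh
      exact absurd hh List.not_mem_nil
    | cons m rest =>
      rw [hsort] at hhead
      simp only [List.head?_cons] at hhead
      have hm := Option.some.inj hhead
      simp only [PySem.List.pyGet?, PySem.List.pyIdx?]
      rw [show (fun (best lab : String) =>
            if PySem.List.count (h :: t) best < PySem.List.count (h :: t) lab then lab else best) =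
          fun best lab => if ((h :: t).count best : Int) < ((h :: t).count lab : Int) then lab else best
          from funext fun b => funext fun x => hcnt b x]
      simp [hm]
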